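-- pv_equiv track=rewrite | github.com/Fiucs/ficusBot | agent/core/agent_task_executor.py | get_next_step_desc
-- ===== SOURCE A (Python) =====
-- from typing import Any, Dict, List, Optional, TYPE_CHECKING, Set
--
-- def get_next_step_desc(task_tree: Dict, completed_steps: List[str]) -> str:
--     """
--     获取下一步骤描述
--
--     Args:
--         task_tree: 任务树
--         completed_steps: 已完成步骤列表
--
--     Returns:
--         下一步骤描述
--     """
--     completed_set = set(completed_steps)
--     steps = task_tree.get("task_tree", [])
--
--     found_current = False
--     for step in steps:
--         if step["step_id"] in completed_set:
--             continue
--         if found_current: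
--             return step.get("step_desc", "")
--         found_current = True
--
--     return "无"
-- ===== SOURCE B (Python) =====
-- from typing import Any, Dict, List, Optional, TYPE_CHECKING, Set
--
-- def skip_to_pending(steps, completed):
--     """Drop the leading already-completed steps; return the suffix starting at
--     the first pending step (or [] if none)."""
--     while steps and steps[0]["step_id"] in completed:
--         steps = steps[1:]
--     return steps
--
-- def get_next_step_desc(task_tree: Dict, completed_steps: List[str]) -> str:
--     completed = set(completed_steps)
--     pending = skip_to_pending(task_tree.get("task_tree", []), completed)
--     if not pending:
--         return "无"
--     pending2 = skip_to_pending(pending[1:], completed)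
--     if not pending2:
--         return "无"
--     return pending2[0].get("step_desc", "")
-- ===== Notes on version B (the rewrite author's own statement) =====
-- stated objective: alternative
-- what changed: Replaces A's single loop with a found_current boolean state machine by a recursive suffix-finder (skip_to_pending, which drops leading completed steps) applied twice in stages; laziness is preserved, so B examines exactly the steps A examines and raises/returns identically.
import Mathlib
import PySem

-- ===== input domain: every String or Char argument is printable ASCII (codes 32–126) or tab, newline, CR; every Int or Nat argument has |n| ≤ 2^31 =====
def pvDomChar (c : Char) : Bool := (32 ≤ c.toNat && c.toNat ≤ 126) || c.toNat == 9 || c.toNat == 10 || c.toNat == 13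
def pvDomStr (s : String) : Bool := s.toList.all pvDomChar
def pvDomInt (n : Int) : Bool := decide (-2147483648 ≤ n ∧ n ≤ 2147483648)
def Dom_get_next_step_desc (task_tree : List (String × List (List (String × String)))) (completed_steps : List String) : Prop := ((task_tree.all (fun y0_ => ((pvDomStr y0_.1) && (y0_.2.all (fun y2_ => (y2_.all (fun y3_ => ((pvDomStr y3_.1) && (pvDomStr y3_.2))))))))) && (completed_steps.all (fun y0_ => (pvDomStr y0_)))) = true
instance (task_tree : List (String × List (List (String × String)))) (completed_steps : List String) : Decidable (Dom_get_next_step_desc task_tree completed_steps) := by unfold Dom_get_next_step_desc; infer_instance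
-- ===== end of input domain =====

-- B replaces A's found_current flag loop by a recursive suffix-finder (drop leading completed
-- steps) applied in two stages; same laziness, same outputs (objective: alternative).


-- ===== PORT A =====
-- step["step_id"] raises KeyError when absent; Pre_ guarantees both programs only ever evaluate
-- it on steps that have the key, so the total `.getD ""` reading is exact on Pre_.
def pvStepId (step : List (String × String)) : String :=
  ((PySem.Dict.mk step).get? "step_id").getD ""

-- the for-loop of A with its found_current flag
def pvA_loop (completed : PySem.Set String) : List (List (String × String)) → Bool → String
  | [], _ => "无"
  | step :: rest, found =>
    if PySem.Set.contains completed (pvStepId step) then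
      pvA_loop completed rest found
    else if found then (PySem.Dict.mk step).getD "step_desc" ""
    else pvA_loop completed rest true

def get_next_step_desc (task_tree : List (String × List (List (String × String)))) (completed_steps : List String) : String :=
  let completed := PySem.Set.ofList completed_steps
  let steps := (PySem.Dict.mk task_tree).getD "task_tree" []
  pvA_loop completed steps false

-- ===== PORT B =====
-- Source B's recursive helper skip_to_pending: drop leading completed steps, return the suffix
def pvSkip (completed : PySem.Set String) : List (List (String × String)) → List (List (String × String))
  | [] => []
  | step :: rest =>
    if PySem.Set.contains completed (pvStepId step) then pvSkip completed rest
    else step :: rest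

def get_next_step_desc_alt (task_tree : List (String × List (List (String × String)))) (completed_steps : List String) : String :=
  let completed := PySem.Set.ofList completed_steps
  match pvSkip completed ((PySem.Dict.mk task_tree).getD "task_tree" []) with
  | [] => "无"
  | _ :: rest =>
    match pvSkip completed rest with
    | [] => "无"
    | step :: _ => (PySem.Dict.mk step).getD "step_desc" ""

-- ===== PRECONDITION & SPEC =====
-- Both programs lazily scan steps in order and raise KeyError at the first step lacking "step_id"
-- unless they return (at the second pending step) before reaching it; Pre_ admits exactly the
-- inputs on which Python A (and B) returns normally: either every step has "step_id", or at
-- least two pending steps occur within the prefix of steps that do have it.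
def Pre_get_next_step_desc (task_tree : List (String × List (List (String × String)))) (completed_steps : List String) : Prop :=
  let steps := (PySem.Dict.mk task_tree).getD "task_tree" []
  let hasId := fun (s : List (String × String)) => ((PySem.Dict.mk s).get? "step_id").isSome
  let p := steps.takeWhile hasId
  p.length = steps.length ∨
    2 ≤ (p.filter (fun s => !(PySem.Set.contains (PySem.Set.ofList completed_steps) (pvStepId s)))).length

instance (task_tree : List (String × List (List (String × String)))) (completed_steps : List String) : Decidable (Pre_get_next_step_desc task_tree completed_steps) := by unfold Pre_get_next_step_desc; infer_instance

def pvWitness_get_next_step_desc : (List (String × List (List (String × String)))) × List String :=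
  ([("task_tree", [[("step_id", "a"), ("step_desc", "do a")], [("step_id", "b"), ("step_desc", "do b")]])], ["a"])

def Spec_get_next_step_desc (task_tree : List (String × List (List (String × String)))) (completed_steps : List String) (out : String) : Prop := out = get_next_step_desc_alt task_tree completed_steps
instance (task_tree : List (String × List (List (String × String)))) (completed_steps : List String) (out : String) : Decidable (Spec_get_next_step_desc task_tree completed_steps out) := by unfold Spec_get_next_step_desc; infer_instance

-- ===== CLAIM =====
def Claim_equal_get_next_step_desc : Prop := ∀ (task_tree : List (String × List (List (String × String)))) (completed_steps : List String), Dom_get_next_step_desc task_tree completed_steps → Pre_get_next_step_desc task_tree completed_steps → Spec_get_next_step_desc task_tree completed_steps (get_next_step_desc task_tree completed_steps)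

-- ===== LEMMAS AND PROOFS =====

-- with the flag already set, A returns the first pending step's description = B's second stage
lemma pvA_loop_true (completed : PySem.Set String) (l : List (List (String × String))) :
    pvA_loop completed l true =
      match pvSkip completed l with
      | [] => "无"
      | step :: _ => (PySem.Dict.mk step).getD "step_desc" "" := by
  induction l with
  | nil => rfl
  | cons step rest ih =>
    simp only [pvA_loop, pvSkip]
    cases h : PySem.Set.contains completed (pvStepId step) <;> simp [ih]

-- with the flag clear, A computes exactly B's two-stage result
lemma pvA_loop_false (completed : PySem.Set String) (l : List (List (String × String))) :
    pvA_loop completed l false =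
      match pvSkip completed l with
      | [] => "无"
      | _ :: rest =>
        match pvSkip completed rest with
        | [] => "无"
        | step :: _ => (PySem.Dict.mk step).getD "step_desc" "" := by
  induction l with
  | nil => rfl
  | cons step rest ih =>
    simp only [pvA_loop, pvSkip]
    cases h : PySem.Set.contains completed (pvStepId step)
    · simp [pvA_loop_true]
    · simp [ih]

-- ===== VERDICT =====
theorem get_next_step_desc_spec : Claim_equal_get_next_step_desc := by
  intro task_tree completed_steps _ _
  unfold Spec_get_next_step_desc get_next_step_desc get_next_step_desc_alt
  exact pvA_loop_false _ _
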